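-- pv_equiv track=rewrite | github.com/NickOneRG/LeetCode | Yandex_Job/Problem-D.py | possible_positions
-- ===== SOURCE A (Python) =====
-- def final_position(commands):
--     position = 0
--     direction = 0  # 0: right, 1: down, 2: left, 3: up
--     for command in commands:
--         if command == 'F':
--             if direction == 0:  # right
--                 position += 1
--             elif direction == 2:  # left
--                 position -= 1
--         elif command == 'R':
--             direction = (direction + 1) % 4
--         elif command == 'L':
--             direction = (direction - 1) % 4
--     return position
--
-- def possible_positions(N, commands):
--     # Calculate the original final position
--     original_position = final_position(commands)
--
--     # Set to keep track of unique positions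
--     unique_positions = {original_position}
--
--     # Try replacing each command with 'F', 'R', and 'L'
--     for i in range(N):
--         for new_command in 'FRL':
--             if commands[i] != new_command:
--                 new_commands = commands[:i] + new_command + commands[i+1:]
--                 new_position = final_position(new_commands)
--                 unique_positions.add(new_position)
--
--     return len(unique_positions)
-- ===== SOURCE B (Python) =====
-- def possible_positions(N, commands):
--     # O(len + N): suffix displacement-by-direction table + one prefix sweep.
--     L = len(commands)
--     # suff[j][d] = net position change of running commands[j:] starting in direction d
--     suff = [None] * (L + 1)
--     suff[L] = (0, 0, 0, 0)
--     for j in range(L - 1, -1, -1):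
--         c = commands[j]
--         n = suff[j + 1]
--         if c == 'F':
--             suff[j] = (n[0] + 1, n[1], n[2] - 1, n[3])
--         elif c == 'R':
--             suff[j] = (n[1], n[2], n[3], n[0])
--         elif c == 'L':
--             suff[j] = (n[3], n[0], n[1], n[2])
--         else:
--             suff[j] = n
--     pos, dir = 0, 0
--     results = {pos + suff[0][0]}          # the original final position
--     for i in range(N):
--         c0 = commands[i]
--         for c in 'FRL':
--             if c0 != c:
--                 if c == 'F':
--                     step = 1 if dir == 0 else (-1 if dir == 2 else 0)
--                     nd = dir
--                 elif c == 'R':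
--                     step, nd = 0, (dir + 1) % 4
--                 else:
--                     step, nd = 0, (dir - 1) % 4
--                 results.add(pos + step + suff[i + 1][nd])
--         # advance the prefix state by the actual command
--         if c0 == 'F':
--             if dir == 0:
--                 pos += 1
--             elif dir == 2:
--                 pos -= 1
--         elif c0 == 'R':
--             dir = (dir + 1) % 4
--         elif c0 == 'L':
--             dir = (dir - 1) % 4
--     return len(results)
-- ===== Notes on version B (the rewrite author's own statement) =====
-- stated objective: faster
-- what changed: B replaces A's full re-simulation of the command string for every candidate replacement (O(N*len)) by one backward pass building a suffix displacement-by-direction table plus one forward prefix sweep, answering each replacement in O(1) (O(len+N) total).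
import Mathlib
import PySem

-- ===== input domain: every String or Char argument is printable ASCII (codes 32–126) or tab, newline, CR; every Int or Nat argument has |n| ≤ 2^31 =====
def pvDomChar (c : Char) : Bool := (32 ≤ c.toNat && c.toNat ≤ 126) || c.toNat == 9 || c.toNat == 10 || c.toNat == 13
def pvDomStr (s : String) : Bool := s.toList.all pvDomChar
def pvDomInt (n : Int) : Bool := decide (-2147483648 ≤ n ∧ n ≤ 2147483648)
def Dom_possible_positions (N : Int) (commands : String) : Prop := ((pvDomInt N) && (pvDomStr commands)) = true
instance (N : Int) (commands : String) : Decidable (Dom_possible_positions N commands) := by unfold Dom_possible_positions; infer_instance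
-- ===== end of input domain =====

-- B replaces A's re-simulation of the whole command string for every single-command replacement
-- (O(N·len)) by one suffix displacement-by-direction table plus one prefix sweep (O(len + N)); same return value.

-- ===== PORT A =====
-- one step of final_position's loop: state = (position, direction)
def fp_step (st : Int × Int) (c : Char) : Int × Int :=
  if c = 'F' then
    if st.2 = 0 then (st.1 + 1, st.2)
    else if st.2 = 2 then (st.1 - 1, st.2)
    else st
  else if c = 'R' then (st.1, PySem.Int.mod (st.2 + 1) 4)
  else if c = 'L' then (st.1, PySem.Int.mod (st.2 - 1) 4)
  else st

-- Python's final_position, over the string's character list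
def fpos (l : List Char) : Int := (l.foldl fp_step (0, 0)).1

def possible_positions (N : Int) (commands : String) : Int :=
  let cs := commands.toList
  let s := (PySem.List.pyRange 0 N 1).foldl (fun s i =>
    (['F', 'R', 'L'] : List Char).foldl (fun s c =>
      -- commands[i]: in range under Pre_; pyGetD is exact there (IndexError excluded by Pre_)
      if PySem.List.pyGetD cs i ' ' ≠ c then
        PySem.Set.add s (fpos (PySem.List.slice cs none (some i) ++ [c] ++
                               PySem.List.slice cs (some (i + 1)) none))
      else s) s)
    (PySem.Set.ofList [fpos commands.toList])
  PySem.Set.len s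

-- ===== PORT B =====
-- suff tuple lookup: component d of (d0, d1, d2, d3)
def pvB_tupGet (t : Int × Int × Int × Int) (d : Int) : Int :=
  if d = 0 then t.1 else if d = 1 then t.2.1 else if d = 2 then t.2.2.1 else t.2.2.2

-- B's backward pass: head of (pvB_suff l) is Python's suff[j] for the suffix l = commands[j:]
def pvB_suff : List Char → List (Int × Int × Int × Int)
  | [] => [(0, 0, 0, 0)]
  | c :: rest =>
    let t := pvB_suff rest
    let n := t.headD (0, 0, 0, 0)
    (if c = 'F' then (n.1 + 1, n.2.1, n.2.2.1 - 1, n.2.2.2)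
     else if c = 'R' then (n.2.1, n.2.2.1, n.2.2.2, n.1)
     else if c = 'L' then (n.2.2.2, n.1, n.2.1, n.2.2.1)
     else n) :: t

-- B's forward loop over i in range(N); walks the char list and the suffix table together
def pvB_loop : Nat → List Char → List (Int × Int × Int × Int) → Int → Int → PySem.Set Int → PySem.Set Int
  | 0, _, _, _, _, s => s
  | _ + 1, [], _, _, _, s => s   -- Python raises IndexError here; excluded by Pre_
  | k + 1, c0 :: rest, tbl, pos, dir, s =>
    let nxt := tbl.tail.headD (0, 0, 0, 0)
    let s1 := (['F', 'R', 'L'] : List Char).foldl (fun s c =>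
      if c0 ≠ c then
        let sd : Int × Int :=
          if c = 'F' then ((if dir = 0 then 1 else if dir = 2 then -1 else 0), dir)
          else if c = 'R' then (0, PySem.Int.mod (dir + 1) 4)
          else (0, PySem.Int.mod (dir - 1) 4)
        PySem.Set.add s (pos + sd.1 + pvB_tupGet nxt sd.2)
      else s) s
    let st' : Int × Int :=
      if c0 = 'F' then
        if dir = 0 then (pos + 1, dir) else if dir = 2 then (pos - 1, dir) else (pos, dir)
      else if c0 = 'R' then (pos, PySem.Int.mod (dir + 1) 4)
      else if c0 = 'L' then (pos, PySem.Int.mod (dir - 1) 4)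
      else (pos, dir)
    pvB_loop k rest tbl.tail st'.1 st'.2 s1

def possible_positions_alt (N : Int) (commands : String) : Int :=
  let cs := commands.toList
  let tbl := pvB_suff cs
  let s0 := PySem.Set.ofList [(0 : Int) + pvB_tupGet (tbl.headD (0, 0, 0, 0)) 0]
  PySem.Set.len (pvB_loop N.toNat cs tbl 0 0 s0)

-- ===== PRECONDITION & SPEC =====
-- A evaluates commands[i] for every i < N, so it raises IndexError iff N > len(commands); Pre_ excludes exactly that.
def Pre_possible_positions (N : Int) (commands : String) : Prop :=
  N ≤ (commands.toList.length : Int)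
instance (N : Int) (commands : String) : Decidable (Pre_possible_positions N commands) := by
  unfold Pre_possible_positions; infer_instance

def pvWitness_possible_positions : Int × String := (2, "FRL")

def Spec_possible_positions (N : Int) (commands : String) (out : Int) : Prop := out = possible_positions_alt N commands
instance (N : Int) (commands : String) (out : Int) : Decidable (Spec_possible_positions N commands out) := by unfold Spec_possible_positions; infer_instance

-- ===== CLAIM (what is proved, stated in full; the proofs are below) =====
def Claim_equal_possible_positions : Prop := ∀ (N : Int) (commands : String), Dom_possible_positions N commands → Pre_possible_positions N commands → Spec_possible_positions N commands (possible_positions N commands)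

-- ===== LEMMAS AND PROOFS =====

-- run the simulation from an arbitrary state
def pvRun (l : List Char) (st : Int × Int) : Int × Int := l.foldl fp_step st

def pvDok (d : Int) : Prop := d = 0 ∨ d = 1 ∨ d = 2 ∨ d = 3

lemma pv_step_shift (st : Int × Int) (c : Char) :
    fp_step st c = (st.1 + (fp_step (0, st.2) c).1, (fp_step (0, st.2) c).2) := by
  rcases st with ⟨p, d⟩
  simp only [fp_step]
  split_ifs <;> simp [Prod.ext_iff] <;> omega

lemma pv_run_shift (l : List Char) (p d : Int) :
    pvRun l (p, d) = (p + (pvRun l (0, d)).1, (pvRun l (0, d)).2) := by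
  induction l generalizing p d with
  | nil => simp [pvRun]
  | cons c l ih =>
    simp only [pvRun, List.foldl_cons] at *
    rcases h : fp_step (0, d) c with ⟨a, d'⟩
    rw [pv_step_shift (p, d) c, h]
    simp only
    rw [ih (p + a) d', ih a d']
    simp [add_assoc]

lemma pv_step_dok (p d : Int) (c : Char) (h : pvDok d) : pvDok (fp_step (p, d) c).2 := by
  rcases h with h | h | h | h <;> subst h <;>
    simp only [fp_step] <;> split_ifs <;> simp [pvDok] <;> decide

lemma pv_suff_head (l : List Char) (d : Int) (hd : pvDok d) :
    pvB_tupGet ((pvB_suff l).headD (0, 0, 0, 0)) d = (pvRun l (0, d)).1 := by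
  induction l generalizing d with
  | nil =>
    rcases hd with h | h | h | h <;> subst h <;> simp [pvB_suff, pvB_tupGet, pvRun]
  | cons c l ih =>
    have h0 := ih 0 (by simp [pvDok])
    have h1 := ih 1 (by simp [pvDok])
    have h2 := ih 2 (by simp [pvDok])
    have h3 := ih 3 (by simp [pvDok])
    have hrun : ∀ a d' : Int, (pvRun l (a, d')).1 = a + (pvRun l (0, d')).1 := by
      intro a d'; rw [pv_run_shift]
    rcases hn : (pvB_suff l).headD (0, 0, 0, 0) with ⟨n0, n1, n2, n3⟩
    rw [hn] at h0 h1 h2 h3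
    norm_num [pvB_tupGet] at h0 h1 h2 h3
    have hcons : ∀ st, pvRun (c :: l) st = pvRun l (fp_step st c) := fun _ => rfl
    simp only [pvB_suff, List.headD_cons]
    rw [hcons, hn]
    by_cases hF : c = 'F'
    · subst hF
      simp only [if_pos rfl]
      rcases hd with h | h | h | h <;> subst h <;> norm_num [pvB_tupGet]
      · rw [show fp_step ((0 : Int), (0 : Int)) 'F' = (1, 0) from by decide, hrun]; omega
      · rw [show fp_step ((0 : Int), (1 : Int)) 'F' = (0, 1) from by decide]; omega
      · rw [show fp_step ((0 : Int), (2 : Int)) 'F' = (-1, 2) from by decide]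
        rw [hrun]; omega
      · rw [show fp_step ((0 : Int), (3 : Int)) 'F' = (0, 3) from by decide]; omega
    · by_cases hR : c = 'R'
      · subst hR
        simp only [if_neg (by decide : ¬('R' = 'F')), if_pos rfl]
        rcases hd with h | h | h | h <;> subst h <;> norm_num [pvB_tupGet]
        · rw [show fp_step ((0 : Int), (0 : Int)) 'R' = (0, 1) from by decide]; omega
        · rw [show fp_step ((0 : Int), (1 : Int)) 'R' = (0, 2) from by decide]; omega
        · rw [show fp_step ((0 : Int), (2 : Int)) 'R' = (0, 3) from by decide]; omega
        · rw [show fp_step ((0 : Int), (3 : Int)) 'R' = (0, 0) from by decide]; omega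
      · by_cases hL : c = 'L'
        · subst hL
          simp only [if_neg (by decide : ¬('L' = 'F')), if_neg (by decide : ¬('L' = 'R')),
            if_pos rfl]
          rcases hd with h | h | h | h <;> subst h <;> norm_num [pvB_tupGet]
          · rw [show fp_step ((0 : Int), (0 : Int)) 'L' = (0, 3) from by decide]; omega
          · rw [show fp_step ((0 : Int), (1 : Int)) 'L' = (0, 0) from by decide]; omega
          · rw [show fp_step ((0 : Int), (2 : Int)) 'L' = (0, 1) from by decide]; omega
          · rw [show fp_step ((0 : Int), (3 : Int)) 'L' = (0, 2) from by decide]; omega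
        · simp only [if_neg hF, if_neg hR, if_neg hL]
          have hstep : fp_step (0, d) c = (0, d) := by
            simp only [fp_step, if_neg hF, if_neg hR, if_neg hL]
          rw [hstep]
          rcases hd with h | h | h | h <;> subst h <;> norm_num [pvB_tupGet] <;> omega

-- the A-side loop body, abstracted over the full command list
def pvAInner (cs : List Char) (i : Int) (s : PySem.Set Int) : PySem.Set Int :=
  (['F', 'R', 'L'] : List Char).foldl (fun s c =>
    if PySem.List.pyGetD cs i ' ' ≠ c then
      PySem.Set.add s (fpos (PySem.List.slice cs none (some i) ++ [c] ++
                             PySem.List.slice cs (some (i + 1)) none))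
    else s) s

def pvAFold (cs : List Char) (idx : List Int) (s : PySem.Set Int) : PySem.Set Int :=
  idx.foldl (fun s i => pvAInner cs i s) s

lemma pv_suff_tail (c : Char) (l : List Char) : (pvB_suff (c :: l)).tail = pvB_suff l := rfl

lemma pv_run_append (l₁ l₂ : List Char) (st : Int × Int) :
    pvRun (l₁ ++ l₂) st = pvRun l₂ (pvRun l₁ st) := List.foldl_append

lemma pv_get_mid (pre rest : List Char) (c0 : Char) :
    PySem.List.pyGetD (pre ++ c0 :: rest) (pre.length : Int) ' ' = c0 := by
  rw [PySem.List.pyGetD_natCast]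
  simp [List.getD_eq_getElem?_getD, List.getElem?_append_right]

lemma pv_slice_left (pre rest : List Char) (c0 : Char) :
    PySem.List.slice (pre ++ c0 :: rest) none (some (pre.length : Int)) = pre := by
  rw [PySem.List.slice_to_natCast]
  exact List.take_left

lemma pv_slice_right (pre rest : List Char) (c0 : Char) :
    PySem.List.slice (pre ++ c0 :: rest) (some ((pre.length : Int) + 1)) none = rest := by
  have h1 : ((pre.length : Int) + 1) = (((pre.length + 1 : Nat)) : Int) := by push_cast; ring
  rw [h1, PySem.List.slice_from_natCast]
  rw [show pre ++ c0 :: rest = (pre ++ [c0]) ++ rest by simp,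
    show pre.length + 1 = (pre ++ [c0]).length by simp]
  exact List.drop_left

-- value of one replacement: prefix position + replacement step + suffix displacement
lemma pv_val (pre rest : List Char) (c : Char) (hdok : pvDok (pvRun pre (0, 0)).2) :
    fpos (pre ++ [c] ++ rest)
      = (pvRun pre (0, 0)).1 + (fp_step (0, (pvRun pre (0, 0)).2) c).1
        + pvB_tupGet ((pvB_suff rest).headD (0, 0, 0, 0)) (fp_step (0, (pvRun pre (0, 0)).2) c).2 := by
  rcases hst : pvRun pre (0, 0) with ⟨pos, dir⟩
  rw [hst] at hdok
  have hd' : pvDok (fp_step (0, dir) c).2 := pv_step_dok 0 dir c hdok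
  have h1 : fpos (pre ++ [c] ++ rest) = (pvRun rest (fp_step (pvRun pre (0, 0)) c)).1 := by
    unfold fpos pvRun
    rw [List.foldl_append, List.foldl_append]
    rfl
  rw [h1, hst, pv_step_shift (pos, dir) c]
  simp only
  rcases hsc : fp_step (0, dir) c with ⟨a, d'⟩
  rw [hsc] at hd'
  simp only
  rw [pv_run_shift, pv_suff_head rest d' hd']

lemma pv_inner_eq (pre rest : List Char) (c0 : Char) (s : PySem.Set Int)
    (hdok : pvDok (pvRun pre (0, 0)).2) :
    pvAInner (pre ++ c0 :: rest) (pre.length : Int) s =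
      (['F', 'R', 'L'] : List Char).foldl (fun s c =>
        if c0 ≠ c then
          let sd : Int × Int :=
            if c = 'F' then ((if (pvRun pre (0, 0)).2 = 0 then 1
                              else if (pvRun pre (0, 0)).2 = 2 then -1 else 0), (pvRun pre (0, 0)).2)
            else if c = 'R' then (0, PySem.Int.mod ((pvRun pre (0, 0)).2 + 1) 4)
            else (0, PySem.Int.mod ((pvRun pre (0, 0)).2 - 1) 4)
          PySem.Set.add s ((pvRun pre (0, 0)).1 + sd.1 +
            pvB_tupGet ((pvB_suff rest).headD (0, 0, 0, 0)) sd.2)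
        else s) s := by
  rcases hst : pvRun pre (0, 0) with ⟨pos, dir⟩
  have hvF := pv_val pre rest 'F' hdok
  have hvR := pv_val pre rest 'R' hdok
  have hvL := pv_val pre rest 'L' hdok
  rw [hst] at hvF hvR hvL
  have hsdF : fp_step (0, dir) 'F' = ((if dir = 0 then 1 else if dir = 2 then -1 else 0), dir) := by
    simp only [fp_step]; split_ifs <;> simp
  have hsdR : fp_step (0, dir) 'R' = (0, PySem.Int.mod (dir + 1) 4) := by
    simp only [fp_step]; split_ifs <;> simp_all
  have hsdL : fp_step (0, dir) 'L' = (0, PySem.Int.mod (dir - 1) 4) := by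
    simp only [fp_step]; split_ifs <;> simp_all
  rw [hsdF] at hvF; rw [hsdR] at hvR; rw [hsdL] at hvL
  simp only [pvAInner, List.foldl_cons, List.foldl_nil,
    pv_get_mid pre rest c0, pv_slice_left pre rest c0, pv_slice_right pre rest c0,
    hvF, hvR, hvL, hst]
  norm_num
  try simp

lemma pv_main (k : Nat) : ∀ (pre suf : List Char) (s : PySem.Set Int), k ≤ suf.length →
    pvDok (pvRun pre (0, 0)).2 →
    pvAFold (pre ++ suf) (PySem.List.pyRange (pre.length : Int) ((pre.length : Int) + k) 1) s
      = pvB_loop k suf (pvB_suff suf) (pvRun pre (0, 0)).1 (pvRun pre (0, 0)).2 s := by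
  induction k with
  | zero =>
    intro pre suf s _ _
    rw [show ((pre.length : Int) + (0 : Nat)) = (pre.length : Int) by push_cast; ring,
      PySem.List.pyRange_one_eq_nil (le_refl _)]
    rfl
  | succ k ih =>
    intro pre suf s hlen hdok
    match suf, hlen with
    | c0 :: rest, hlen =>
      have hrange : PySem.List.pyRange (pre.length : Int) ((pre.length : Int) + ((k + 1 : Nat) : Int)) 1
          = (pre.length : Int) ::
            PySem.List.pyRange ((pre.length : Int) + 1) ((pre.length : Int) + ((k + 1 : Nat) : Int)) 1 :=
        PySem.List.pyRange_one_cons (by push_cast; omega)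
      rw [hrange]
      have hstep : pvAFold (pre ++ c0 :: rest)
          ((pre.length : Int) :: PySem.List.pyRange ((pre.length : Int) + 1) ((pre.length : Int) + ((k + 1 : Nat) : Int)) 1) s
          = pvAFold (pre ++ c0 :: rest)
            (PySem.List.pyRange ((pre.length : Int) + 1) ((pre.length : Int) + ((k + 1 : Nat) : Int)) 1)
            (pvAInner (pre ++ c0 :: rest) (pre.length : Int) s) := rfl
      rw [hstep]
      rcases hst : pvRun pre (0, 0) with ⟨pos, dir⟩
      -- B side: one step of pvB_loop
      rw [show pvB_loop (k + 1) (c0 :: rest) (pvB_suff (c0 :: rest)) pos dir s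
            = pvB_loop k rest (pvB_suff (c0 :: rest)).tail
                (if c0 = 'F' then
                    if dir = 0 then (pos + 1, dir) else if dir = 2 then (pos - 1, dir) else (pos, dir)
                  else if c0 = 'R' then (pos, PySem.Int.mod (dir + 1) 4)
                  else if c0 = 'L' then (pos, PySem.Int.mod (dir - 1) 4)
                  else (pos, dir)).1
                (if c0 = 'F' then
                    if dir = 0 then (pos + 1, dir) else if dir = 2 then (pos - 1, dir) else (pos, dir)
                  else if c0 = 'R' then (pos, PySem.Int.mod (dir + 1) 4)
                  else if c0 = 'L' then (pos, PySem.Int.mod (dir - 1) 4)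
                  else (pos, dir)).2
                ((['F', 'R', 'L'] : List Char).foldl (fun s c =>
                  if c0 ≠ c then
                    let sd : Int × Int :=
                      if c = 'F' then ((if dir = 0 then 1 else if dir = 2 then -1 else 0), dir)
                      else if c = 'R' then (0, PySem.Int.mod (dir + 1) 4)
                      else (0, PySem.Int.mod (dir - 1) 4)
                    PySem.Set.add s (pos + sd.1 +
                      pvB_tupGet ((pvB_suff (c0 :: rest)).tail.headD (0, 0, 0, 0)) sd.2)
                  else s) s)
            from rfl]
      rw [pv_suff_tail]
      have hadv : (if c0 = 'F' then
            if dir = 0 then (pos + 1, dir) else if dir = 2 then (pos - 1, dir) else (pos, dir)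
          else if c0 = 'R' then (pos, PySem.Int.mod (dir + 1) 4)
          else if c0 = 'L' then (pos, PySem.Int.mod (dir - 1) 4)
          else (pos, dir)) = fp_step (pos, dir) c0 := by
        simp only [fp_step]
      rw [hadv]
      have hinner := pv_inner_eq pre rest c0 s hdok
      rw [hst] at hinner
      rw [hinner]
      -- apply the induction hypothesis with pre' = pre ++ [c0]
      have hpre' : pvRun (pre ++ [c0]) (0, 0) = fp_step (pos, dir) c0 := by
        rw [pv_run_append]; rw [hst]; rfl
      have hdok' : pvDok (pvRun (pre ++ [c0]) (0, 0)).2 := by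
        rw [hpre']
        exact pv_step_dok pos dir c0 (by rw [hst] at hdok; exact hdok)
      have hih := ih (pre ++ [c0]) rest
        ((['F', 'R', 'L'] : List Char).foldl (fun s c =>
          if c0 ≠ c then
            let sd : Int × Int :=
              if c = 'F' then ((if dir = 0 then 1 else if dir = 2 then -1 else 0), dir)
              else if c = 'R' then (0, PySem.Int.mod (dir + 1) 4)
              else (0, PySem.Int.mod (dir - 1) 4)
            PySem.Set.add s (pos + sd.1 +
              pvB_tupGet ((pvB_suff rest).headD (0, 0, 0, 0)) sd.2)
          else s) s)
        (by simpa using Nat.lt_succ_iff.mp (by simpa using hlen)) hdok'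
      rw [hpre'] at hih
      have harg1 : (pre ++ [c0]) ++ rest = pre ++ c0 :: rest := by simp
      have harg2 : (((pre ++ [c0]).length : Int)) = (pre.length : Int) + 1 := by
        simp
      have harg3 : ((pre.length : Int) + 1) + (k : Int)
          = (pre.length : Int) + ((k + 1 : Nat) : Int) := by
        push_cast; ring
      rw [harg1, harg2] at hih
      rw [harg3] at hih
      exact hih

-- ===== VERDICT (by name: the statement is the Claim_ definition above) =====
theorem possible_positions_spec : Claim_equal_possible_positions := by
  intro N commands _ hpre
  unfold Spec_possible_positions
  unfold Pre_possible_positions at hpre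
  have hnat : N.toNat ≤ commands.toList.length := by omega
  have hmain := pv_main N.toNat [] commands.toList
      (PySem.Set.ofList [fpos commands.toList]) hnat (Or.inl rfl)
  simp only [List.nil_append, List.length_nil, Nat.cast_zero, zero_add,
    pvRun, List.foldl_nil] at hmain
  have hrange : PySem.List.pyRange 0 N 1 = PySem.List.pyRange 0 (N.toNat : Int) 1 := by
    by_cases h0 : 0 ≤ N
    · rw [Int.toNat_of_nonneg h0]
    · rw [PySem.List.pyRange_one_eq_nil (by omega), PySem.List.pyRange_one_eq_nil (by omega)]
  have hs0 : (0 : Int) + pvB_tupGet ((pvB_suff commands.toList).headD (0, 0, 0, 0)) 0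
      = fpos commands.toList := by
    rw [pv_suff_head commands.toList 0 (Or.inl rfl)]
    simp [fpos, pvRun]
  have hA : possible_positions N commands
      = PySem.Set.len (pvAFold commands.toList (PySem.List.pyRange 0 N 1)
          (PySem.Set.ofList [fpos commands.toList])) := rfl
  have hB : possible_positions_alt N commands
      = PySem.Set.len (pvB_loop N.toNat commands.toList (pvB_suff commands.toList) 0 0
          (PySem.Set.ofList [(0 : Int) + pvB_tupGet ((pvB_suff commands.toList).headD (0, 0, 0, 0)) 0])) := rfl
  rw [hA, hB, hs0, hrange, hmain]
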